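-- pv_equiv track=rewrite | github.com/AlvesMatheusO/paralell | foster.py | splitGraph
-- ===== SOURCE A (Python) =====
-- import math
--
-- def splitGraph(graph, numParts):
--     nodes = list(graph.keys())
--     # Divide em pedaços de tamanho aproximado, garantindo que nenhum fique vazio
--     chunk = math.ceil(len(nodes) / numParts)
--     subgraphs = []
--
--     for i in range(numParts):
--         start_idx = i * chunk
--         end_idx   = start_idx + chunk
--         part = nodes[start_idx:end_idx]
--
--         # induce o subgrafo: só arestas entre nós de `part`
--         sg = {
--             n: [v for v in graph[n] if v in part]
--             for n in part
--         }
--         subgraphs.append(sg)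
--
--     return subgraphs
-- ===== SOURCE B (Python) =====
-- import math
--
-- def splitGraph(graph, numParts):
--     # Peeling: repeatedly slice off the first chunk of the remaining graph, emit its
--     # induced subgraph, and rewrite the remainder with the peeled nodes' edges deleted.
--     chunk = math.ceil(len(graph) / numParts)
--     subgraphs = []
--     g = graph
--     k = numParts
--     while k > 0:
--         nodes = list(g)
--         head = nodes[:chunk]
--         hs = set(head)
--         subgraphs.append({n: [v for v in g[n] if v in hs] for n in head})
--         g = {n: [v for v in g[n] if v not in hs] for n in nodes[chunk:]}
--         k -= 1
--     return subgraphs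
-- ===== Notes on version B (the rewrite author's own statement) =====
-- stated objective: alternative
-- what changed: A loops over part indices and, per part, re-slices the full node list and induces each subgraph against the original graph by list membership; B is a peeling loop that never indexes into the original list: it slices the first chunk off the REMAINING graph, emits its induced subgraph, rewrites the remainder with the peeled nodes' edges deleted, and repeats on the shrinking graph. Pre_ restricts to numParts != 0 (A raises ZeroDivisionError at 0) and duplicate-free key lists (a Python dict cannot carry duplicate keys).
import Mathlib
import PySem

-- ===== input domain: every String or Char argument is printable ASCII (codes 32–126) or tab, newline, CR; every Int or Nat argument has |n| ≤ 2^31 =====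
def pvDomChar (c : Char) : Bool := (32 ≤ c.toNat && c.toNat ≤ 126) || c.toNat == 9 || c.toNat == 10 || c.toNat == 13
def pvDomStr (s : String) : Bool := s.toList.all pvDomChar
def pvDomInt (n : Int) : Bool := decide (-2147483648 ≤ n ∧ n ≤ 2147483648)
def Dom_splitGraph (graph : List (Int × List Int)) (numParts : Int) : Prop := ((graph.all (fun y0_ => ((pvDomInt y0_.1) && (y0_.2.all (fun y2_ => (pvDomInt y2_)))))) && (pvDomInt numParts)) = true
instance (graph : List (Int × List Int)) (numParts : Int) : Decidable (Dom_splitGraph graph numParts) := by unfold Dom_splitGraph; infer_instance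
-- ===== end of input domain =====

-- B replaces A's indexed loop over parts (re-slicing the full node list each time) by a
-- peeling loop that slices the first chunk off the REMAINING graph, emits its induced
-- subgraph, and rewrites the remainder with the peeled nodes' edges deleted (objective: alternative).

-- ===== PORT A =====
-- A's `math.ceil(len(nodes) / numParts)`: on the admitted domain the float division is exact
-- enough that the result equals ceiling division, ported as -((-len) // numParts).
def splitGraph (graph : List (Int × List Int)) (numParts : Int) : List (List (Int × List Int)) :=
  let nodes := graph.map Prod.fst
  let chunk : Int := -(PySem.Int.floordiv (-(nodes.length : Int)) numParts)
  (PySem.List.pyRange 0 numParts 1).foldl (fun subs i =>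
      let part := PySem.List.slice nodes (some (i * chunk)) (some (i * chunk + chunk))
      let sg := part.foldl (fun d n =>
          d.insert n ((((PySem.Dict.mk graph).get? n).getD []).filter (fun v => part.contains v)))
        (PySem.Dict.mk [])
      subs ++ [sg.items]) []

-- ===== PORT B =====
-- the `while k > 0` loop of Source B, recursing on the loop counter k
def splitGraphPeel (chunk : Int) (subs : List (List (Int × List Int)))
    (g : List (Int × List Int)) (k : Int) : List (List (Int × List Int)) :=
  if 0 < k then
    let nodes := g.map Prod.fst
    let head := PySem.List.slice nodes none (some chunk)
    let hs := PySem.Set.ofList head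
    let sg := head.foldl (fun d n =>
        d.insert n ((((PySem.Dict.mk g).get? n).getD []).filter (fun v => hs.contains v)))
      (PySem.Dict.mk [])
    let rest := (PySem.List.slice nodes (some chunk) none).foldl (fun d n =>
        d.insert n ((((PySem.Dict.mk g).get? n).getD []).filter (fun v => !hs.contains v)))
      (PySem.Dict.mk [])
    splitGraphPeel chunk (subs ++ [sg.items]) rest.items (k - 1)
  else subs
termination_by k.toNat
decreasing_by omega

def splitGraph_alt (graph : List (Int × List Int)) (numParts : Int) : List (List (Int × List Int)) :=
  let chunk : Int := -(PySem.Int.floordiv (-(graph.length : Int)) numParts)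
  splitGraphPeel chunk [] graph numParts

-- ===== PRECONDITION & SPEC =====
-- Pre_ restricts to numParts ≠ 0 (A raises ZeroDivisionError at numParts = 0) and to
-- duplicate-free key lists (a Python dict cannot carry duplicate keys).
def Pre_splitGraph (graph : List (Int × List Int)) (numParts : Int) : Prop :=
  (graph.map Prod.fst).Nodup ∧ numParts ≠ 0
instance (graph : List (Int × List Int)) (numParts : Int) : Decidable (Pre_splitGraph graph numParts) := by unfold Pre_splitGraph; infer_instance

def pvWitness_splitGraph : (List (Int × List Int)) × Int :=
  ([(1, [1, 2]), (2, [2]), (3, [1, 3])], 2)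

def Spec_splitGraph (graph : List (Int × List Int)) (numParts : Int) (out : List (List (Int × List Int))) : Prop := out = splitGraph_alt graph numParts
instance (graph : List (Int × List Int)) (numParts : Int) (out : List (List (Int × List Int))) : Decidable (Spec_splitGraph graph numParts out) := by unfold Spec_splitGraph; infer_instance

-- ===== CLAIM (what is proved, stated in full; the proofs are below) =====
def Claim_equal_splitGraph : Prop := ∀ (graph : List (Int × List Int)) (numParts : Int), Dom_splitGraph graph numParts → Pre_splitGraph graph numParts → Spec_splitGraph graph numParts (splitGraph graph numParts)

-- ===== LEMMAS AND PROOFS =====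

-- the induced subgraph of `g` on the node list `part`, as both programs build it
def pvBlock (g : List (Int × List Int)) (part : List Int) : List (Int × List Int) :=
  (part.foldl (fun d n =>
      d.insert n ((((PySem.Dict.mk g).get? n).getD []).filter (fun v => part.contains v)))
    (PySem.Dict.mk [])).items

theorem pv_block_congr (g1 g2 : List (Int × List Int)) (part : List Int)
    (h : ∀ n ∈ part,
      (((PySem.Dict.mk g1).get? n).getD []).filter (fun v => part.contains v)
        = (((PySem.Dict.mk g2).get? n).getD []).filter (fun v => part.contains v)) :
    pvBlock g1 part = pvBlock g2 part := by
  unfold pvBlock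
  congr 1
  apply PySem.List.foldl_congr_mem
  intro acc n hn
  rw [h n hn]

theorem pv_get?_mk_map (f : Int → List Int) :
    ∀ (xs : List Int) (n : Int), n ∈ xs →
      (PySem.Dict.mk (xs.map (fun m => (m, f m)))).get? n = some (f n) := by
  intro xs
  induction xs with
  | nil => intro n h; cases h
  | cons x t ih =>
    intro n h
    rw [List.map_cons, PySem.Dict.get?_mk_cons]
    by_cases hx : x = n
    · subst hx; simp
    · rw [if_neg (by simpa using hx)]
      rcases List.mem_cons.mp h with h1 | h1
      · exact absurd h1.symm hx
      · exact ih n h1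

theorem pv_peel_eq (c : Nat) :
    ∀ (k : Nat) (g : List (Int × List Int)) (subs : List (List (Int × List Int))),
      (g.map Prod.fst).Nodup →
      splitGraphPeel (c : Int) subs g (k : Int)
        = subs ++ (List.range k).map
            (fun i => pvBlock g (((g.map Prod.fst).drop (i * c)).take c)) := by
  intro k
  induction k with
  | zero =>
    intro g subs _
    rw [splitGraphPeel]
    simp
  | succ k ih =>
    intro g subs hnd
    rw [splitGraphPeel, if_pos (by exact_mod_cast Nat.succ_pos k)]
    dsimp only
    set nodes := g.map Prod.fst with hnodes
    have hhead : PySem.List.slice nodes none (some ((c : Nat) : Int)) = nodes.take c :=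
      PySem.List.slice_to_natCast nodes c
    have htail : PySem.List.slice nodes (some ((c : Nat) : Int)) none = nodes.drop c :=
      PySem.List.slice_from_natCast nodes c
    rw [hhead, htail]
    rw [show PySem.Set.ofList (nodes.take c) = nodes.take c from
      PySem.Set.ofList_eq_self_of_nodup _ (hnd.sublist (List.take_sublist c nodes))]
    simp only [PySem.Set.contains_eq_listContains]
    -- the rest-dict is a fresh-key loop: its items are a map over the remaining nodes
    have hrest : ((nodes.drop c).foldl (fun d n =>
        d.insert n ((((PySem.Dict.mk g).get? n).getD []).filter
          (fun v => !(nodes.take c).contains v)))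
        (PySem.Dict.mk [])).items
        = (nodes.drop c).map (fun n =>
            (n, (((PySem.Dict.mk g).get? n).getD []).filter
              (fun v => !(nodes.take c).contains v))) := by
      have h := PySem.Dict.items_foldl_insert_fresh (nodes.drop c) (fun n => n)
        (fun n => (((PySem.Dict.mk g).get? n).getD []).filter
          (fun v => !(nodes.take c).contains v))
        (PySem.Dict.mk []) (by intro a _; rfl)
        (by simpa using (hnd.sublist (List.drop_sublist c nodes)))
      simpa using h
    rw [hrest]
    set val : Int → List Int := fun n =>
      (((PySem.Dict.mk g).get? n).getD []).filter (fun v => !(nodes.take c).contains v)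
      with hval
    have hfst : (((nodes.drop c).map (fun n => (n, val n))).map Prod.fst) = nodes.drop c := by
      rw [List.map_map]
      exact List.map_id'' (fun n => rfl) _
    have hnd' : (((nodes.drop c).map (fun n => (n, val n))).map Prod.fst).Nodup := by
      rw [hfst]; exact hnd.sublist (List.drop_sublist c nodes)
    rw [show (((k + 1 : Nat) : Int) - 1) = ((k : Nat) : Int) by push_cast; ring]
    rw [ih ((nodes.drop c).map (fun n => (n, val n))) _ hnd']
    rw [hfst]
    rw [List.range_succ_eq_map, List.map_cons, List.map_map]
    rw [List.append_assoc, List.singleton_append]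
    congr 1
    congr 1
    · show (List.foldl (fun d n =>
          d.insert n ((((PySem.Dict.mk g).get? n).getD []).filter
            (fun v => (nodes.take c).contains v))) (PySem.Dict.mk []) (nodes.take c)).items
          = pvBlock g ((nodes.drop (0 * c)).take c)
      simp [pvBlock]
    apply List.map_congr_left
    intro i _
    show pvBlock ((nodes.drop c).map (fun n => (n, val n))) (((nodes.drop c).drop (i * c)).take c)
        = pvBlock g ((nodes.drop ((i + 1) * c)).take c)
    have hdd : (nodes.drop c).drop (i * c) = nodes.drop ((i + 1) * c) := by
      rw [List.drop_drop]
      congr 1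
      ring
    rw [hdd]
    apply pv_block_congr
    intro n hn
    set part := (nodes.drop ((i + 1) * c)).take c with hpart
    have hmem : n ∈ nodes.drop c := by
      have h1 : n ∈ nodes.drop ((i + 1) * c) := List.mem_of_mem_take hn
      rw [← hdd] at h1
      exact List.mem_of_mem_drop h1
    rw [pv_get?_mk_map val (nodes.drop c) n hmem]
    show (val n).filter (fun v => part.contains v)
        = (((PySem.Dict.mk g).get? n).getD []).filter (fun v => part.contains v)
    rw [hval]
    dsimp only
    rw [List.filter_filter]
    apply List.filter_congr
    intro a _
    simp
    intro ha
    have h1 : a ∈ nodes.drop ((i + 1) * c) := List.mem_of_mem_take ha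
    rw [← hdd] at h1
    exact fun h' => (List.disjoint_take_drop hnd (le_refl c)) h' (List.mem_of_mem_drop h1)

-- ===== VERDICT (by name: the statement is the Claim_ definition above) =====
theorem splitGraph_spec : Claim_equal_splitGraph := by
  intro graph N _hdom hpre
  obtain ⟨hnd, hNe⟩ := hpre
  unfold Spec_splitGraph splitGraph splitGraph_alt
  dsimp only
  set nodes := graph.map Prod.fst with hnodes
  have hlen : (graph.length : Int) = (nodes.length : Int) := by
    rw [hnodes, List.length_map]
  rw [hlen]
  set chunk : Int := -(PySem.Int.floordiv (-(nodes.length : Int)) N) with hchunk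
  by_cases hN : 0 < N
  · have hbr : (chunk - 1) * N < (nodes.length : Int) ∧ (nodes.length : Int) ≤ chunk * N :=
      (PySem.Int.neg_floordiv_neg_eq_iff_of_pos hN).mp hchunk.symm
    have hc0 : 0 ≤ chunk := by
      by_contra h
      have h2 : chunk < 0 := by omega
      have h1 : chunk * N < 0 := mul_neg_of_neg_of_pos h2 hN
      have h3 : (0 : Int) ≤ (nodes.length : Int) := Int.natCast_nonneg _
      omega
    set c := chunk.toNat with hc
    have hcc : chunk = (c : Int) := by omega
    set U := N.toNat with hU
    have hNU : N = (U : Int) := by omega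
    rw [hcc, hNU, PySem.List.pyRange_one]
    simp only [sub_zero, Int.toNat_natCast, zero_add]
    rw [PySem.List.foldl_append_singleton_eq_map, List.nil_append]
    rw [pv_peel_eq c U graph [] hnd, List.nil_append]
    rw [List.map_map]
    apply List.map_congr_left
    intro u _
    dsimp only [Function.comp_def]
    have hslice : PySem.List.slice nodes (some ((u : Int) * (c : Int)))
        (some ((u : Int) * (c : Int) + (c : Int))) = (nodes.drop (u * c)).take c := by
      rw [show ((u : Int) * (c : Int)) = ((u * c : Nat) : Int) by push_cast; ring]
      exact PySem.List.slice_natCast_add nodes (u * c) c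
    rw [hslice]
    rfl
  · have hNlt : N < 0 := by omega
    rw [PySem.List.pyRange_one_eq_nil (by omega), List.foldl_nil]
    rw [splitGraphPeel, if_neg hN]
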